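-- pv_equiv track=rewrite | github.com/Mzekala-Romanadze/TBC-_-Python-Project | Assignment_15/Task_2.py | sum_same_index_numbers
-- ===== SOURCE A (Python) =====
-- def sum_same_index_numbers(list_1, list_2, list_3):
--     max_length = max(len(list_1), len(list_2), len(list_3))
--     sum_list = []
--     for i in range(max_length):
--         temp_sum = 0
--         if i < len(list_1):
--             temp_sum += list_1[i]
--         if i < len(list_2):
--             temp_sum += list_2[i]
--         if i < len(list_3):
--             temp_sum += list_3[i]
--         sum_list.append(temp_sum)
--     return sum_list
-- ===== SOURCE B (Python) =====
-- def sum_same_index_numbers(list_1, list_2, list_3):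
--     max_length = max(len(list_1), len(list_2), len(list_3))
--     result = [0] * max_length
--     for lst in (list_1, list_2, list_3):
--         for i, x in enumerate(lst):
--             result[i] += x
--     return result
-- ===== Notes on version B (the rewrite author's own statement) =====
-- stated objective: alternative
-- what changed: B preallocates a zero accumulator of the maximum length and folds each of the three lists into it element-by-element (list-outer loop), instead of A's index-outer loop with per-list bounds checks.
import Mathlib
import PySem

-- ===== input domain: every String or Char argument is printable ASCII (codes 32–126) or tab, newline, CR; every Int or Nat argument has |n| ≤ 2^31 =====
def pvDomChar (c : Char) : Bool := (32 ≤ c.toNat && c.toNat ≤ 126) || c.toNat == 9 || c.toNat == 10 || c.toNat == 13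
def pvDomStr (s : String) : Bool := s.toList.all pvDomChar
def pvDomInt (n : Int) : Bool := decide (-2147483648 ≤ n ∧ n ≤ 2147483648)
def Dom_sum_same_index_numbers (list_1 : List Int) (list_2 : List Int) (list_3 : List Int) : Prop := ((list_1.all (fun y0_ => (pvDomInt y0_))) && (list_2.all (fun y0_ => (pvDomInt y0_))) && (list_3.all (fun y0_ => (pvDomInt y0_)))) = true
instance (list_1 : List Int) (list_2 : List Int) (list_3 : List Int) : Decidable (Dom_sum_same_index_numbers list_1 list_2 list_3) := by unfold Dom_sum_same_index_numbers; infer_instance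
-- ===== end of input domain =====

-- B builds the result by folding each list into a preallocated zero accumulator
-- (list-outer loop) instead of A's index-outer loop with per-list bounds checks;
-- same cost, different decomposition.

-- ===== PORT A =====
-- A: for i in range(max_length): temp_sum = 0; three bounds-checked adds; append.
def sum_same_index_numbers (list_1 : List Int) (list_2 : List Int) (list_3 : List Int) : List Int :=
  let max_length := max list_1.length (max list_2.length list_3.length)
  (List.range max_length).foldl (fun sum_list i =>
    let temp_sum : Int := 0
    let temp_sum := if i < list_1.length then temp_sum + list_1.getD i 0 else temp_sum
    let temp_sum := if i < list_2.length then temp_sum + list_2.getD i 0 else temp_sum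
    let temp_sum := if i < list_3.length then temp_sum + list_3.getD i 0 else temp_sum
    sum_list ++ [temp_sum]) []

-- ===== PORT B =====
-- B-side helper: the inner loop 'for i, x in enumerate(lst): result[i] += x',
-- adding each element of lst into the front of the accumulator.
def pvAddInto (acc : List Int) (lst : List Int) : List Int :=
  match acc, lst with
  | acc, [] => acc
  | [], _ => []
  | a :: acc', x :: lst' => (a + x) :: pvAddInto acc' lst'

def sum_same_index_numbers_alt (list_1 : List Int) (list_2 : List Int) (list_3 : List Int) : List Int :=
  let max_length := max list_1.length (max list_2.length list_3.length)
  let result := List.replicate max_length (0 : Int)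
  [list_1, list_2, list_3].foldl pvAddInto result

-- ===== PRECONDITION & SPEC =====
def Spec_sum_same_index_numbers (list_1 : List Int) (list_2 : List Int) (list_3 : List Int) (out : List Int) : Prop := out = sum_same_index_numbers_alt list_1 list_2 list_3
instance (list_1 : List Int) (list_2 : List Int) (list_3 : List Int) (out : List Int) : Decidable (Spec_sum_same_index_numbers list_1 list_2 list_3 out) := by unfold Spec_sum_same_index_numbers; infer_instance

-- ===== CLAIM (what is proved, stated in full; the proofs are below) =====
def Claim_equal_sum_same_index_numbers : Prop := ∀ (list_1 : List Int) (list_2 : List Int) (list_3 : List Int), Dom_sum_same_index_numbers list_1 list_2 list_3 → Spec_sum_same_index_numbers list_1 list_2 list_3 (sum_same_index_numbers list_1 list_2 list_3)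

-- ===== LEMMAS AND PROOFS =====

theorem pvAddInto_length (acc lst : List Int) : (pvAddInto acc lst).length = acc.length := by
  induction acc generalizing lst with
  | nil => cases lst <;> simp [pvAddInto]
  | cons a acc' ih => cases lst <;> simp [pvAddInto, ih]

theorem pvAddInto_getD (acc lst : List Int) (i : ℕ) (h : i < acc.length) :
    (pvAddInto acc lst).getD i 0 = acc.getD i 0 + lst.getD i 0 := by
  induction acc generalizing lst i with
  | nil => simp at h
  | cons a acc' ih =>
    cases lst with
    | nil => simp [pvAddInto]
    | cons x lst' =>
      cases i with
      | zero => simp [pvAddInto]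
      | succ i' =>
        simp only [pvAddInto, List.getD_cons_succ]
        exact ih lst' i' (by simpa using h)

theorem a_foldl_eq_map (f : ℕ → Int) (n : ℕ) :
    (List.range n).foldl (fun sum_list i => sum_list ++ [f i]) [] = (List.range n).map f := by
  simpa using PySem.List.foldl_append_singleton_eq_map f (List.range n) []

-- ===== VERDICT (by name: the statement is the Claim_ definition above) =====
theorem sum_same_index_numbers_spec : Claim_equal_sum_same_index_numbers := by
  intro l1 l2 l3 _
  unfold Spec_sum_same_index_numbers sum_same_index_numbers sum_same_index_numbers_alt
  simp only [List.foldl]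
  rw [a_foldl_eq_map (fun i =>
    let t0 : Int := 0
    let t1 := if i < l1.length then t0 + l1.getD i 0 else t0
    let t2 := if i < l2.length then t1 + l2.getD i 0 else t1
    if i < l3.length then t2 + l3.getD i 0 else t2)]
  apply List.ext_getElem
  · simp [pvAddInto_length]
  · intro i h1 h2
    have hlen : i < max l1.length (max l2.length l3.length) := by
      simpa using h1
    have hrep : i < (List.replicate (max l1.length (max l2.length l3.length)) (0 : Int)).length := by
      simpa using hlen
    have key : ((pvAddInto (pvAddInto (pvAddInto (List.replicate (max l1.length (max l2.length l3.length)) (0 : Int)) l1) l2) l3)).getD i 0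
        = l1.getD i 0 + l2.getD i 0 + l3.getD i 0 := by
      rw [pvAddInto_getD _ _ _ (by simp [pvAddInto_length, hlen]),
          pvAddInto_getD _ _ _ (by simp [pvAddInto_length, hlen]),
          pvAddInto_getD _ _ _ hrep]
      simp
    rw [← List.getD_eq_getElem _ 0 h1, ← List.getD_eq_getElem _ 0 h2]
    rw [List.getD_eq_getElem _ 0 h1, List.getElem_map, List.getElem_range]
    rw [key]
    have e1 : l1.getD i 0 = if i < l1.length then l1.getD i 0 else 0 := by
      split_ifs with h
      · rfl
      · simp [Nat.le_of_not_lt h]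
    have e2 : l2.getD i 0 = if i < l2.length then l2.getD i 0 else 0 := by
      split_ifs with h
      · rfl
      · simp [Nat.le_of_not_lt h]
    have e3 : l3.getD i 0 = if i < l3.length then l3.getD i 0 else 0 := by
      split_ifs with h
      · rfl
      · simp [Nat.le_of_not_lt h]
    simp only []
    split_ifs <;> simp_all
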